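-- pv_equiv track=rewrite | github.com/ryanbritodev/python | dia14/xadrez.py | imprimirXadrez
-- ===== SOURCE A (Python) =====
-- def imprimirXadrez(linhas, colunas):
--     bitBranco = [255, 255, 255]
--     bitPreto = [0, 0, 0]
--     linha = []
--     chess = []
--     if linhas != colunas:
--         return None
--     else:
--         for i in range(linhas):
--             linha = []
--             if linhas % 2 == 0:
--                 for j in range(colunas // 2):
--                     if linhas % 2 == 0:
--                         if colunas % 2 == 0 and i % 2 != 0:
--                             linha.append(bitPreto)
--                             linha.append(bitBranco)
--                         else:
--                             linha.append(bitBranco)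
--                             linha.append(bitPreto)
--             else:
--                 for j in range(colunas // 2):
--                     if colunas % 2 != 0 and i % 2 != 0:
--                         linha.append(bitPreto)
--                         linha.append(bitBranco)
--                     else:
--                         linha.append(bitBranco)
--                         linha.append(bitPreto)
--             chess.append(linha)
--         return chess
-- ===== SOURCE B (Python) =====
-- def imprimirXadrez(linhas, colunas):
--     if linhas != colunas:
--         return None
--     branco = [255, 255, 255]
--     preto = [0, 0, 0]
--     half = colunas // 2
--     rowE = [branco, preto] * half
--     rowO = [preto, branco] * half
--     return [list(rowE) if i % 2 == 0 else list(rowO) for i in range(linhas)]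
-- ===== Notes on version B (the rewrite author's own statement) =====
-- stated objective: simpler
-- what changed: B precomputes two row templates ([branco,preto]*half and its swap) and builds the board by selecting a template per row parity, replacing A's nested per-pair append loops with redundant parity re-checks.
import Mathlib
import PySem

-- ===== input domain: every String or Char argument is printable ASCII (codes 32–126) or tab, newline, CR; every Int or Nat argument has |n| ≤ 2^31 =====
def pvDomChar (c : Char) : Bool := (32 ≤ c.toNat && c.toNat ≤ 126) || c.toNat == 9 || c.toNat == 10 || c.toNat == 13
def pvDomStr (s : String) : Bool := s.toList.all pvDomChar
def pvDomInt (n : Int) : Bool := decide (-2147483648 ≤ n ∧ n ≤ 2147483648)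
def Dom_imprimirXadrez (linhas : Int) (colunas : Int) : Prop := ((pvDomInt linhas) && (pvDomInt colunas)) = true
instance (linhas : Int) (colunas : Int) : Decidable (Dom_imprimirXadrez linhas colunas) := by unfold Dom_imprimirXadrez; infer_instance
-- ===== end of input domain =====

-- B replaces A's nested per-pair append loops (with redundant parity re-checks) by two
-- precomputed row templates selected by row parity; return value only, no mutation observable.

-- ===== PORT A =====
def imprimirXadrez (linhas : Int) (colunas : Int) : Option (List (List (List Int))) :=
  let bitBranco : List Int := [255, 255, 255]
  let bitPreto : List Int := [0, 0, 0]
  if linhas ≠ colunas then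
    none
  else
    some ((PySem.List.pyRange 0 linhas 1).foldl (fun chess i =>
      let linha : List (List Int) :=
        if PySem.Int.mod linhas 2 = 0 then
          (PySem.List.pyRange 0 (PySem.Int.floordiv colunas 2) 1).foldl (fun linha _ =>
            if PySem.Int.mod linhas 2 = 0 then
              if PySem.Int.mod colunas 2 = 0 ∧ PySem.Int.mod i 2 ≠ 0 then
                linha ++ [bitPreto] ++ [bitBranco]
              else
                linha ++ [bitBranco] ++ [bitPreto]
            else linha) []
        else
          (PySem.List.pyRange 0 (PySem.Int.floordiv colunas 2) 1).foldl (fun linha _ =>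
            if PySem.Int.mod colunas 2 ≠ 0 ∧ PySem.Int.mod i 2 ≠ 0 then
              linha ++ [bitPreto] ++ [bitBranco]
            else
              linha ++ [bitBranco] ++ [bitPreto]) []
      chess ++ [linha]) [])

-- ===== PORT B =====
def imprimirXadrez_alt (linhas : Int) (colunas : Int) : Option (List (List (List Int))) :=
  if linhas ≠ colunas then
    none
  else
    let branco : List Int := [255, 255, 255]
    let preto : List Int := [0, 0, 0]
    let half := PySem.Int.floordiv colunas 2
    let rowE : List (List Int) := (List.replicate half.toNat [branco, preto]).flatten
    let rowO : List (List Int) := (List.replicate half.toNat [preto, branco]).flatten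
    some ((PySem.List.pyRange 0 linhas 1).map (fun i =>
      if PySem.Int.mod i 2 = 0 then rowE else rowO))

-- ===== PRECONDITION & SPEC =====
def Spec_imprimirXadrez (linhas : Int) (colunas : Int) (out : Option (List (List (List Int)))) : Prop := out = imprimirXadrez_alt linhas colunas
instance (linhas : Int) (colunas : Int) (out : Option (List (List (List Int)))) : Decidable (Spec_imprimirXadrez linhas colunas out) := by unfold Spec_imprimirXadrez; infer_instance

-- ===== CLAIM (what is proved, stated in full; the proofs are below) =====
def Claim_equal_imprimirXadrez : Prop := ∀ (linhas : Int) (colunas : Int), Dom_imprimirXadrez linhas colunas → Spec_imprimirXadrez linhas colunas (imprimirXadrez linhas colunas)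

-- ===== LEMMAS AND PROOFS =====

-- A's inner pair-appending loop builds exactly a flattened replicate of the pair.
theorem foldl_append_pair {α : Type} (p q : α) :
    ∀ (l : List Int) (init : List α),
      l.foldl (fun acc _ => acc ++ [p] ++ [q]) init
        = init ++ (List.replicate l.length ([p, q] : List α)).flatten := by
  intro l
  induction l with
  | nil => intro init; simp
  | cons x xs ih =>
    intro init
    simp [List.foldl_cons, List.replicate_succ]

theorem length_pyRange_zero_one (n : Int) :
    (PySem.List.pyRange 0 n 1).length = n.toNat := by
  simp [PySem.List.pyRange]; omega

theorem imprimirXadrez_eq_alt (linhas colunas : Int) :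
    imprimirXadrez linhas colunas = imprimirXadrez_alt linhas colunas := by
  unfold imprimirXadrez imprimirXadrez_alt
  by_cases h : linhas = colunas
  · subst h
    simp only [ne_eq, not_true_eq_false, if_false]
    rw [PySem.List.foldl_append_singleton_eq_map]
    refine congrArg some (List.map_congr_left ?_)
    intro i _
    by_cases hp : PySem.Int.mod linhas 2 = 0
    · simp only [hp, if_true, true_and]
      by_cases hi : PySem.Int.mod i 2 = 0
      · simp only [hi, not_true_eq_false, if_false, if_true]
        rw [foldl_append_pair, length_pyRange_zero_one]
        simp
      · simp only [hi, not_false_eq_true, if_true, ite_false]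
        rw [foldl_append_pair, length_pyRange_zero_one]
        simp
    · simp only [hp, if_false]
      simp only [not_false_eq_true, true_and]
      by_cases hi : PySem.Int.mod i 2 = 0
      · simp only [hi, not_true_eq_false, if_false, if_true]
        rw [foldl_append_pair, length_pyRange_zero_one]
        simp
      · simp only [hi, not_false_eq_true, if_true, ite_false]
        rw [foldl_append_pair, length_pyRange_zero_one]
        simp
  · simp [h]

-- ===== VERDICT (by name: the statement is the Claim_ definition above) =====
theorem imprimirXadrez_spec : Claim_equal_imprimirXadrez := by
  intro linhas colunas _
  exact imprimirXadrez_eq_alt linhas colunas
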